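-- pv_equiv track=rewrite | github.com/abhi-wadhwa/stable-matching | src/core/hospital_resident.py | verify_rural_hospital
-- ===== SOURCE A (Python) =====
-- from typing import Dict, List, Optional, Set, Tuple
--
-- def verify_rural_hospital(
--     matchings: List[Dict[str, List[str]]],
-- ) -> bool:
--     """Verify the Rural Hospital Theorem across multiple stable matchings.
--
--     Checks that:
--     1. The same set of residents are matched in every stable matching.
--     2. Any hospital that is under-subscribed in one matching is
--        under-subscribed in all, with the *same* residents.
--
--     Parameters
--     ----------
--     matchings : list of dict
--         Multiple stable matchings ``{hospital: [residents]}``.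
--
--     Returns
--     -------
--     bool
--         True if the Rural Hospital Theorem holds.
--     """
--     if not matchings:
--         return True
--
--     # Check 1: Same set of matched residents.
--     matched_sets = []
--     for m in matchings:
--         residents = frozenset(r for rs in m.values() for r in rs)
--         matched_sets.append(residents)
--
--     if len(set(matched_sets)) > 1:
--         return False
--
--     # Check 2: Under-subscribed hospitals have same residents.
--     # We don't have quotas here, but we can check that hospitals with
--     # fewer residents in one matching have the same residents in all.
--     hospitals = set()
--     for m in matchings:
--         hospitals.update(m.keys())
--
--     for h in hospitals:
--         residents_across = [frozenset(m.get(h, [])) for m in matchings]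
--         sizes = [len(rs) for rs in residents_across]
--         min_size = min(sizes)
--         max_size = max(sizes)
--
--         if min_size != max_size:
--             # Different sizes -> not all matchings have same count.
--             # But rural hospital says under-quota hospitals have same residents.
--             # If sizes differ, theorem is violated.
--             return False
--
--     return True
-- ===== SOURCE B (Python) =====
-- def verify_rural_hospital(matchings):
--     """Single streaming pass: each matching is reduced to one summary
--     (its set of matched residents, its set of positive (hospital, load) pairs)
--     and compared to the first summary with early exit.  A hospital that is
--     absent or empty contributes no pair, so equal positive-load sets already
--     force equal loads everywhere: no global hospital universe is ever built."""
--     ref = None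
--     for m in matchings:
--         residents = set()
--         load = set()
--         for h, rs in m.items():
--             rset = set(rs)
--             residents |= rset
--             if rset:
--                 load.add((h, len(rset)))
--         if ref is None:
--             ref = (residents, load)
--         elif (residents, load) != ref:
--             return False
--     return True
-- ===== Notes on version B (the rewrite author's own statement) =====
-- stated objective: faster
-- what changed: B makes one streaming pass that reduces each matching to a summary (resident set, set of positive (hospital, load) pairs) compared to the first with early exit; absent/empty hospitals contribute nothing, so B never builds A's global hospital universe and drops the hospital-transposed pass that calls m.get(h) for every (hospital, matching) pair.
import Mathlib
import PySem

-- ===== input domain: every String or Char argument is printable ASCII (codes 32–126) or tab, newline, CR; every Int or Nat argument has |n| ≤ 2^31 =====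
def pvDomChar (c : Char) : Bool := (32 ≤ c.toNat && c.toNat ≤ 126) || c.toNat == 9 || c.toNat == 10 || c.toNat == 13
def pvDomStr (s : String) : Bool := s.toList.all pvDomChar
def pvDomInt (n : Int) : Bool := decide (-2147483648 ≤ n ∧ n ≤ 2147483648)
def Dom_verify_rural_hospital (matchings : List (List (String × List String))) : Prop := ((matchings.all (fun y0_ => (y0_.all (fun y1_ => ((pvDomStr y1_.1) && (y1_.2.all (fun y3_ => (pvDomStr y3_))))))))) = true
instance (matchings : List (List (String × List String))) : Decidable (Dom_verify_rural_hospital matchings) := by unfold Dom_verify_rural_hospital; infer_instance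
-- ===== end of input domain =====

-- B replaces A's two staged passes (set-of-frozensets cardinality check, then a hospital-transposed
-- min/max pass over a global hospital universe) by ONE streaming pass that reduces each matching to a
-- summary (resident set, positive (hospital, load) pairs) compared to the first, with early exit.

-- ===== PORT A =====
-- hand-port of Python's set(...) over a list of frozensets: keep the first occurrence under
-- set-equality (exact: Python's set dedupes by frozenset equality; only its length is used)
def pvSetOfSets (xs : List (PySem.Set String)) : List (PySem.Set String) :=
  xs.foldl (fun acc s => if acc.any (fun t => PySem.Set.equal t s) then acc else acc ++ [s]) []

def verify_rural_hospital (matchings : List (List (String × List String))) : Bool :=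
  match matchings with
  | [] => true
  | m0 :: rest =>
    let matchings := m0 :: rest
    let matched_sets : List (PySem.Set String) :=
      matchings.foldl
        (fun acc m => acc ++ [PySem.Set.ofList (PySem.Dict.values (PySem.Dict.mk m)).flatten]) []
    if (pvSetOfSets matched_sets).length > 1 then false
    else
      let hospitals : PySem.Set String :=
        matchings.foldl
          (fun acc m => PySem.Set.update acc (PySem.Dict.keys (PySem.Dict.mk m))) PySem.Set.empty
      hospitals.all (fun h =>
        let residents_across :=
          matchings.map (fun m => PySem.Set.ofList (PySem.Dict.getD (PySem.Dict.mk m) h []))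
        let sizes : List Nat := residents_across.map List.length
        -- matchings is nonempty here, so sizes ≠ [] and Python's min/max cannot raise
        PySem.List.min? sizes (fun x => x) == PySem.List.max? sizes (fun x => x))

-- ===== PORT B =====
-- inner loop of Source B: for h, rs in m.items(): residents |= set(rs); if set(rs): load.add((h, len(set(rs))))
-- (a dict's items() is the association list itself — Pre_ below restricts to unique keys, the dict invariant)
def pvSummarize (m : List (String × List String)) : PySem.Set String × PySem.Set (String × Nat) :=
  m.foldl
    (fun st p =>
      let rset : PySem.Set String := PySem.Set.ofList p.2
      (PySem.Set.union st.1 rset,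
       if rset.isEmpty then st.2 else PySem.Set.add st.2 (p.1, rset.length)))
    (PySem.Set.empty, PySem.Set.empty)

-- Source B's main loop: ref starts as None, is set at the first matching, later summaries are compared to it
def pvLoop (ref : Option (PySem.Set String × PySem.Set (String × Nat))) :
    List (List (String × List String)) → Bool
  | [] => true
  | m :: ms =>
    let sig := pvSummarize m
    match ref with
    | none => pvLoop (some sig) ms
    | some r =>
      if PySem.Set.equal sig.1 r.1 && PySem.Set.equal sig.2 r.2 then pvLoop (some r) ms
      else false

def verify_rural_hospital_alt (matchings : List (List (String × List String))) : Bool :=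
  pvLoop none matchings

-- ===== PRECONDITION & SPEC =====
-- Pre_ excludes association lists carrying a duplicate hospital key: those do not represent any Python
-- dict (A's parameter type), so no behaviour of A exists there to match.
def Pre_verify_rural_hospital (matchings : List (List (String × List String))) : Prop :=
  ∀ m ∈ matchings, (m.map Prod.fst).Nodup
instance (matchings : List (List (String × List String))) : Decidable (Pre_verify_rural_hospital matchings) := by unfold Pre_verify_rural_hospital; infer_instance

def pvWitness_verify_rural_hospital : (List (List (String × List String))) :=
  [[("h1", ["r1", "r2"]), ("h2", [])], [("h1", ["r2", "r1"]), ("h2", [])]]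

def Spec_verify_rural_hospital (matchings : List (List (String × List String))) (out : Bool) : Prop := out = verify_rural_hospital_alt matchings
instance (matchings : List (List (String × List String))) (out : Bool) : Decidable (Spec_verify_rural_hospital matchings out) := by unfold Spec_verify_rural_hospital; infer_instance

-- ===== CLAIM (what is proved, stated in full; the proofs are below) =====
def Claim_equal_verify_rural_hospital : Prop := ∀ (matchings : List (List (String × List String))), Dom_verify_rural_hospital matchings → Pre_verify_rural_hospital matchings → Spec_verify_rural_hospital matchings (verify_rural_hospital matchings)

-- ===== LEMMAS AND PROOFS =====

-- the number of distinct residents matched to hospital h in matching m (the quantity A's check 2 compares)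
def pvCnt (m : List (String × List String)) (h : String) : Nat :=
  (PySem.Set.ofList (PySem.Dict.getD (PySem.Dict.mk m) h [])).length

-- the dedup fold only ever extends its accumulator
lemma pvFoldPrefix (xs : List (PySem.Set String)) (acc : List (PySem.Set String)) :
    acc <+: xs.foldl (fun acc s => if acc.any (fun t => PySem.Set.equal t s) then acc else acc ++ [s]) acc := by
  induction xs generalizing acc with
  | nil => simp
  | cons s xs ih =>
    simp only [List.foldl_cons]
    refine List.IsPrefix.trans ?_ (ih _)
    split
    · exact List.prefix_refl _
    · exact List.prefix_append _ _

-- every input element is set-equal to some element of the dedup fold's result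
lemma pvFoldCovered (xs : List (PySem.Set String)) (acc : List (PySem.Set String)) :
    ∀ s ∈ xs, ∃ t ∈ xs.foldl (fun acc s => if acc.any (fun t => PySem.Set.equal t s) then acc else acc ++ [s]) acc,
      PySem.Set.equal t s = true := by
  induction xs generalizing acc with
  | nil => simp
  | cons a xs ih =>
    intro s hs
    simp only [List.foldl_cons]
    rcases List.mem_cons.mp hs with rfl | hs
    · by_cases h : acc.any (fun t => PySem.Set.equal t s) = true
      · obtain ⟨t, ht, hts⟩ := List.any_eq_true.mp h
        exact ⟨t, (pvFoldPrefix xs _).subset (by simp [h, ht]), hts⟩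
      · refine ⟨s, (pvFoldPrefix xs _).subset ?_, (PySem.Set.equal_iff s s).mpr (fun _ => Iff.rfl)⟩
        simp [h]
    · exact ih _ s hs

-- if every later frozenset equals the first, the fold stays at the singleton
lemma pvFoldConst (x : PySem.Set String) (xs : List (PySem.Set String))
    (h : ∀ s ∈ xs, PySem.Set.equal x s = true) :
    xs.foldl (fun acc s => if acc.any (fun t => PySem.Set.equal t s) then acc else acc ++ [s]) [x] = [x] := by
  induction xs with
  | nil => rfl
  | cons s xs ih =>
    simp only [List.foldl_cons]
    rw [if_pos (by simp [h s (List.mem_cons_self ..)])]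
    exact ih (fun s hs => h s (List.mem_cons_of_mem _ hs))

-- len(set(matched_sets)) ≤ 1  ↔  every later resident frozenset equals the first
lemma pvDedupLen (x : PySem.Set String) (xs : List (PySem.Set String)) :
    (pvSetOfSets (x :: xs)).length ≤ 1 ↔ ∀ s ∈ xs, PySem.Set.equal x s = true := by
  unfold pvSetOfSets
  simp only [List.foldl_cons, List.any_nil, Bool.false_eq_true, if_false, List.nil_append]
  constructor
  · intro hle s hs
    obtain ⟨t2, hpre⟩ := pvFoldPrefix xs [x]
    obtain ⟨u, hu, hus⟩ := pvFoldCovered xs [x] s hs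
    rw [← hpre] at hle hu
    have ht2 : t2 = [] := by
      cases t2 with
      | nil => rfl
      | cons _ _ => simp at hle
    rw [ht2] at hu
    rcases List.mem_singleton.mp hu with rfl
    exact hus
  · intro hall
    rw [pvFoldConst x xs hall]
    simp

-- min(sizes) == max(sizes) on a nonempty list ↔ all later entries equal the first
lemma pvMinMax (a : Nat) (l : List Nat) :
    (PySem.List.min? (a :: l) (fun x => x) == PySem.List.max? (a :: l) (fun x => x)) = true ↔
      ∀ x ∈ l, x = a := by
  obtain ⟨mn, hmn⟩ : ∃ mn, PySem.List.min? (a :: l) (fun x => x) = some mn := by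
    cases h : PySem.List.min? (a :: l) (fun x => x) with
    | none => exact absurd ((PySem.List.min?_eq_none_iff _ _).mp h) (by simp)
    | some v => exact ⟨v, rfl⟩
  obtain ⟨mx, hmx⟩ : ∃ mx, PySem.List.max? (a :: l) (fun x => x) = some mx := by
    cases h : PySem.List.max? (a :: l) (fun x => x) with
    | none => exact absurd ((PySem.List.max?_eq_none_iff _ _).mp h) (by simp)
    | some v => exact ⟨v, rfl⟩
  rw [hmn, hmx, beq_iff_eq, Option.some.injEq]
  constructor
  · intro he x hx
    have h1 := PySem.List.min?_isMin hmn x (List.mem_cons_of_mem _ hx)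
    have h2 := PySem.List.max?_isMax hmx x (List.mem_cons_of_mem _ hx)
    have ha1 := PySem.List.min?_isMin hmn a (List.mem_cons_self ..)
    have ha2 := PySem.List.max?_isMax hmx a (List.mem_cons_self ..)
    simp only at h1 h2 ha1 ha2
    omega
  · intro hall
    have hmem : ∀ y ∈ a :: l, y = a := by
      intro y hy
      rcases List.mem_cons.mp hy with rfl | h
      · rfl
      · exact hall y h
    rw [hmem mn (PySem.List.min?_mem hmn), hmem mx (PySem.List.max?_mem hmx)]

-- membership in A's folded hospital set
lemma pvMemFoldUpdate (ms : List (List (String × List String))) (s : PySem.Set String) (y : String) :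
    y ∈ ms.foldl (fun acc m => PySem.Set.update acc (PySem.Dict.keys (PySem.Dict.mk m))) s ↔
      y ∈ s ∨ ∃ m ∈ ms, y ∈ PySem.Dict.keys (PySem.Dict.mk m) := by
  induction ms generalizing s with
  | nil => simp
  | cons m ms ih =>
    simp only [List.foldl_cons]
    rw [ih]
    rw [PySem.Set.mem_update]
    simp only [List.mem_cons]
    constructor
    · rintro ((h | h) | ⟨m', hm', h⟩)
      · exact Or.inl h
      · exact Or.inr ⟨m, Or.inl rfl, h⟩
      · exact Or.inr ⟨m', Or.inr hm', h⟩
    · rintro (h | ⟨m', (rfl | hm'), h⟩)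
      · exact Or.inl (Or.inl h)
      · exact Or.inl (Or.inr h)
      · exact Or.inr ⟨m', hm', h⟩

-- A = true, characterized (nonempty case)
lemma pvACharacterize (m0 : List (String × List String)) (rest : List (List (String × List String))) :
    verify_rural_hospital (m0 :: rest) = true ↔
      ((∀ s ∈ rest.map (fun m => PySem.Set.ofList (PySem.Dict.values (PySem.Dict.mk m)).flatten),
          PySem.Set.equal (PySem.Set.ofList (PySem.Dict.values (PySem.Dict.mk m0)).flatten) s = true) ∧
        ∀ h, (∃ m ∈ m0 :: rest, h ∈ PySem.Dict.keys (PySem.Dict.mk m)) →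
          ∀ m ∈ rest, pvCnt m h = pvCnt m0 h) := by
  simp only [verify_rural_hospital, pvCnt]
  rw [PySem.List.foldl_append_singleton_eq_map]
  simp only [List.nil_append, List.map_cons]
  split_ifs with hgt
  · have hno : ¬ ∀ s ∈ rest.map (fun m => PySem.Set.ofList (PySem.Dict.values (PySem.Dict.mk m)).flatten),
        PySem.Set.equal (PySem.Set.ofList (PySem.Dict.values (PySem.Dict.mk m0)).flatten) s = true := by
      intro hc
      have hle := (pvDedupLen (PySem.Set.ofList (PySem.Dict.values (PySem.Dict.mk m0)).flatten)
        (rest.map (fun m => PySem.Set.ofList (PySem.Dict.values (PySem.Dict.mk m)).flatten))).mpr hc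
      omega
    simp only [false_iff]
    rintro ⟨c1, _⟩
    exact hno c1
  · have c1 := (pvDedupLen (PySem.Set.ofList (PySem.Dict.values (PySem.Dict.mk m0)).flatten)
      (rest.map (fun m => PySem.Set.ofList (PySem.Dict.values (PySem.Dict.mk m)).flatten))).mp (by omega)
    rw [List.all_eq_true]
    constructor
    · intro hall
      refine ⟨c1, ?_⟩
      intro h hh m hm
      have hmem : h ∈ (m0 :: rest).foldl
          (fun acc m => PySem.Set.update acc (PySem.Dict.keys (PySem.Dict.mk m))) PySem.Set.empty :=
        (pvMemFoldUpdate _ _ h).mpr (Or.inr hh)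
      have ht := hall h hmem
      simp only [List.map_map] at ht
      rw [pvMinMax] at ht
      exact ht _ (List.mem_map_of_mem hm)
    · rintro ⟨_, c2⟩ h hmem
      have hh := ((pvMemFoldUpdate _ _ h).mp hmem).resolve_left (by simp [PySem.Set.empty])
      simp only [List.map_map]
      rw [pvMinMax]
      intro x hx
      obtain ⟨m, hm, rfl⟩ := List.mem_map.mp hx
      exact c2 h hh m hm

-- B's summary fold splits into its two independent component folds
lemma pvSummarizeEq (m : List (String × List String)) :
    pvSummarize m =
      (m.foldl (fun s p => PySem.Set.union s (PySem.Set.ofList p.2)) PySem.Set.empty,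
       m.foldl (fun s p => if (PySem.Set.ofList p.2).isEmpty then s
                           else PySem.Set.add s (p.1, (PySem.Set.ofList p.2).length)) PySem.Set.empty) := by
  unfold pvSummarize
  rw [PySem.List.foldl_prod_mk
    (f := fun s (p : String × List String) => PySem.Set.union s (PySem.Set.ofList p.2))
    (g := fun s (p : String × List String) => if (PySem.Set.ofList p.2).isEmpty then s
          else PySem.Set.add s (p.1, (PySem.Set.ofList p.2).length))]

-- membership in B's resident component
lemma pvMemRes (m : List (String × List String)) (s0 : PySem.Set String) (y : String) :
    y ∈ m.foldl (fun s p => PySem.Set.union s (PySem.Set.ofList p.2)) s0 ↔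
      y ∈ s0 ∨ ∃ p ∈ m, y ∈ p.2 := by
  induction m generalizing s0 with
  | nil => simp
  | cons q m ih =>
    simp only [List.foldl_cons, ih, PySem.Set.mem_union, PySem.Set.mem_ofList, List.mem_cons]
    constructor
    · rintro ((h | h) | ⟨p, hp, h⟩)
      · exact Or.inl h
      · exact Or.inr ⟨q, Or.inl rfl, h⟩
      · exact Or.inr ⟨p, Or.inr hp, h⟩
    · rintro (h | ⟨p, (rfl | hp), h⟩)
      · exact Or.inl (Or.inl h)
      · exact Or.inl (Or.inr h)
      · exact Or.inr ⟨p, hp, h⟩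

-- membership in B's load component
lemma pvMemLoad (m : List (String × List String)) (s0 : PySem.Set (String × Nat)) (x : String × Nat) :
    x ∈ m.foldl (fun s p => if (PySem.Set.ofList p.2).isEmpty then s
                            else PySem.Set.add s (p.1, (PySem.Set.ofList p.2).length)) s0 ↔
      x ∈ s0 ∨ ∃ p ∈ m, (PySem.Set.ofList p.2).isEmpty = false ∧ x = (p.1, (PySem.Set.ofList p.2).length) := by
  induction m generalizing s0 with
  | nil => simp
  | cons q m ih =>
    simp only [List.foldl_cons, List.mem_cons]
    by_cases he : (PySem.Set.ofList q.2).isEmpty = true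
    · rw [if_pos he, ih]
      constructor
      · rintro (h | ⟨p, hp, h⟩)
        · exact Or.inl h
        · exact Or.inr ⟨p, Or.inr hp, h⟩
      · rintro (h | ⟨p, (rfl | hp), hne, h⟩)
        · exact Or.inl h
        · rw [he] at hne; cases hne
        · exact Or.inr ⟨p, hp, hne, h⟩
    · rw [if_neg he, ih]
      simp only [PySem.Set.mem_add]
      constructor
      · rintro ((h | rfl) | ⟨p, hp, h⟩)
        · exact Or.inl h
        · exact Or.inr ⟨q, Or.inl rfl, Bool.eq_false_iff.mpr he, rfl⟩
        · exact Or.inr ⟨p, Or.inr hp, h⟩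
      · rintro (h | ⟨p, (rfl | hp), hne, h⟩)
        · exact Or.inl (Or.inl h)
        · exact Or.inl (Or.inr h)
        · exact Or.inr ⟨p, hp, hne, h⟩

-- keys of the dict over an association list are its first components
lemma pvKeysMk (m : List (String × List String)) :
    PySem.Dict.keys (PySem.Dict.mk m) = m.map Prod.fst := rfl

-- a hospital outside m has zero load
lemma pvCntZero (m : List (String × List String)) (h : String)
    (hh : h ∉ m.map Prod.fst) : pvCnt m h = 0 := by
  have hc : (PySem.Dict.mk m).contains h = false := by
    rcases Bool.eq_false_or_eq_true ((PySem.Dict.mk m).contains h) with hc | hc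
    · exact absurd (((PySem.Dict.contains_iff_mem_keys _ _).mp hc)) (by rw [pvKeysMk] at *; exact hh)
    · exact hc
  rw [pvCnt, PySem.Dict.getD_of_not_contains _ _ hc]
  rfl

-- the load component is exactly the graph of pvCnt restricted to positive values
lemma pvLoadChar (m : List (String × List String)) (hnd : (m.map Prod.fst).Nodup)
    (h : String) (c : Nat) :
    (h, c) ∈ (pvSummarize m).2 ↔ pvCnt m h = c ∧ 0 < c := by
  rw [pvSummarizeEq]
  simp only
  rw [pvMemLoad]
  simp only [PySem.Set.empty, List.not_mem_nil, false_or]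
  constructor
  · rintro ⟨p, hp, hne, heq⟩
    obtain ⟨rfl, rfl⟩ : h = p.1 ∧ c = (PySem.Set.ofList p.2).length := by
      exact ⟨congrArg Prod.fst heq, congrArg Prod.snd heq⟩
    have hget : (PySem.Dict.mk m).getD p.1 [] = p.2 :=
      PySem.Dict.getD_of_mem_items (PySem.Dict.mk m) (by exact hp) (by rw [pvKeysMk]; exact hnd) []
    refine ⟨by rw [pvCnt, hget], ?_⟩
    cases hlst : PySem.Set.ofList p.2 with
    | nil => rw [hlst] at hne; simp at hne
    | cons a l => simp
  · rintro ⟨hcnt, hpos⟩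
    have hc : (PySem.Dict.mk m).contains h = true := by
      rcases Bool.eq_false_or_eq_true ((PySem.Dict.mk m).contains h) with ht | hf
      · exact ht
      · rw [pvCnt, PySem.Dict.getD_of_not_contains _ _ hf] at hcnt
        simp [PySem.Set.ofList] at hcnt
        omega
    obtain ⟨v, hv⟩ : ∃ v, (PySem.Dict.mk m).get? h = some v := by
      have := PySem.Dict.contains_eq_isSome_get? (d := PySem.Dict.mk m) (k := h)
      rw [hc] at this
      cases hg : (PySem.Dict.mk m).get? h with
      | none => rw [hg] at this; simp at this
      | some v => exact ⟨v, rfl⟩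
    have hitems : (h, v) ∈ (PySem.Dict.mk m).items := PySem.Dict.mem_items_of_get?_eq_some _ hv
    have hget : (PySem.Dict.mk m).getD h [] = v := PySem.Dict.getD_of_get?_eq_some _ _ hv
    refine ⟨(h, v), hitems, ?_, ?_⟩
    · rw [pvCnt, hget] at hcnt
      cases hlst : PySem.Set.ofList v with
      | nil => rw [hlst] at hcnt; simp at hcnt; omega
      | cons a l => simp
    · rw [pvCnt, hget] at hcnt
      simp only [hcnt]

-- set-equality of load components ↔ pointwise equality of loads
lemma pvLoadEqIff (m m' : List (String × List String))
    (hm : (m.map Prod.fst).Nodup) (hm' : (m'.map Prod.fst).Nodup) :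
    PySem.Set.equal (pvSummarize m).2 (pvSummarize m').2 = true ↔ ∀ h, pvCnt m h = pvCnt m' h := by
  rw [PySem.Set.equal_iff]
  constructor
  · intro heq h
    by_cases hpos : 0 < pvCnt m h
    · have := (heq (h, pvCnt m h)).mp ((pvLoadChar m hm h _).mpr ⟨rfl, hpos⟩)
      exact ((pvLoadChar m' hm' h _).mp this).1.symm
    · by_cases hpos' : 0 < pvCnt m' h
      · have := (heq (h, pvCnt m' h)).mpr ((pvLoadChar m' hm' h _).mpr ⟨rfl, hpos'⟩)
        have := ((pvLoadChar m hm h _).mp this).1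
        omega
      · omega
  · intro hall x
    obtain ⟨h, c⟩ := x
    rw [pvLoadChar m hm h c, pvLoadChar m' hm' h c, hall h]

-- set-equality of resident components ↔ A's frozenset equality
lemma pvResEqIff (m m' : List (String × List String)) :
    PySem.Set.equal (pvSummarize m).1 (pvSummarize m').1 = true ↔
      PySem.Set.equal (PySem.Set.ofList (PySem.Dict.values (PySem.Dict.mk m')).flatten)
        (PySem.Set.ofList (PySem.Dict.values (PySem.Dict.mk m)).flatten) = true := by
  rw [PySem.Set.equal_iff, PySem.Set.equal_iff]
  have hmem : ∀ (mm : List (String × List String)) (y : String),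
      (y ∈ (pvSummarize mm).1 ↔ ∃ p ∈ mm, y ∈ p.2) ∧
      (y ∈ PySem.Set.ofList (PySem.Dict.values (PySem.Dict.mk mm)).flatten ↔ ∃ p ∈ mm, y ∈ p.2) := by
    intro mm y
    constructor
    · rw [pvSummarizeEq]
      simp only
      rw [pvMemRes]
      simp [PySem.Set.empty]
    · rw [PySem.Set.mem_ofList, List.mem_flatten]
      constructor
      · rintro ⟨l, hl, hy⟩
        obtain ⟨p, hp, rfl⟩ := List.mem_map.mp hl
        exact ⟨p, hp, hy⟩
      · rintro ⟨p, hp, hy⟩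
        exact ⟨p.2, List.mem_map_of_mem hp, hy⟩
  constructor
  · intro he y
    rw [(hmem m' y).2, (hmem m y).2, ← (hmem m' y).1, ← (hmem m y).1]
    exact (he y).symm
  · intro he y
    rw [(hmem m y).1, (hmem m' y).1, ← (hmem m y).2, ← (hmem m' y).2]
    exact (he y).symm

-- B's tail loop = "every later summary equals the reference"
lemma pvLoopChar (r : PySem.Set String × PySem.Set (String × Nat))
    (ms : List (List (String × List String))) :
    pvLoop (some r) ms = true ↔
      ∀ m ∈ ms, PySem.Set.equal (pvSummarize m).1 r.1 = true ∧
        PySem.Set.equal (pvSummarize m).2 r.2 = true := by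
  induction ms with
  | nil => simp [pvLoop]
  | cons m ms ih =>
    simp only [pvLoop]
    by_cases h : (PySem.Set.equal (pvSummarize m).1 r.1 && PySem.Set.equal (pvSummarize m).2 r.2) = true
    · rw [if_pos h, ih]
      obtain ⟨h1, h2⟩ := Bool.and_eq_true_iff.mp h
      simp only [List.mem_cons]
      constructor
      · intro hall m' hm'
        rcases hm' with rfl | hm'
        · exact ⟨h1, h2⟩
        · exact hall m' hm'
      · intro hall m' hm'
        exact hall m' (Or.inr hm')
    · rw [if_neg h]
      simp only [Bool.false_eq_true, false_iff]
      intro hc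
      exact h (by rw [(hc m (List.mem_cons_self ..)).1, (hc m (List.mem_cons_self ..)).2]; rfl)

-- the nonempty case, A = B
lemma pvKey (m0 : List (String × List String)) (rest : List (List (String × List String)))
    (hpre : ∀ m ∈ m0 :: rest, (m.map Prod.fst).Nodup) :
    verify_rural_hospital (m0 :: rest) = verify_rural_hospital_alt (m0 :: rest) := by
  have hB : verify_rural_hospital_alt (m0 :: rest) = pvLoop (some (pvSummarize m0)) rest := rfl
  rw [Bool.eq_iff_iff, pvACharacterize, hB, pvLoopChar]
  have hnd0 := hpre m0 (List.mem_cons_self ..)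
  constructor
  · rintro ⟨c1, c2⟩ m hm
    have hndm := hpre m (List.mem_cons_of_mem _ hm)
    refine ⟨?_, ?_⟩
    · exact (pvResEqIff m m0).mpr (c1 _ (List.mem_map_of_mem hm))
    · rw [pvLoadEqIff m m0 hndm hnd0]
      intro h
      by_cases hu : ∃ m' ∈ m0 :: rest, h ∈ PySem.Dict.keys (PySem.Dict.mk m')
      · exact c2 h hu m hm
      · push Not at hu
        rw [pvCntZero m h (by have := hu m (List.mem_cons_of_mem _ hm); rwa [pvKeysMk] at this),
          pvCntZero m0 h (by have := hu m0 (List.mem_cons_self ..); rwa [pvKeysMk] at this)]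
  · intro hall
    constructor
    · intro s hs
      obtain ⟨m, hm, rfl⟩ := List.mem_map.mp hs
      exact (pvResEqIff m m0).mp (hall m hm).1
    · intro h _ m hm
      have hndm := hpre m (List.mem_cons_of_mem _ hm)
      exact (pvLoadEqIff m m0 hndm hnd0).mp (hall m hm).2 h

-- ===== VERDICT (by name: the statement is the Claim_ definition above) =====
theorem verify_rural_hospital_spec : Claim_equal_verify_rural_hospital := by
  intro matchings _ hpre
  unfold Spec_verify_rural_hospital
  match matchings with
  | [] => rfl
  | m0 :: rest => exact pvKey m0 rest hpre
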